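-- pv_equiv track=rewrite | github.com/KamelGaanoun/Foa_test | C6_insert.py | filter_photo_names
-- ===== SOURCE A (Python) =====
-- def filter_photo_names(photo_names):
--     """Filters the photo names according to the rule: if _3 and _4 exist, ignore all 4."""
--     grouped_names = {}
--
--     for name in photo_names:
--         base_name = name[:-6]  # Remove the last 2 characters (_1, _2, _3, _4)
--         if base_name not in grouped_names:
--             grouped_names[base_name] = set()
--         grouped_names[base_name].add(name[-6:])  # Store _1, _2, _3, _4 suffixes
--
--     filtered_names = set()
--
--     for base_name, suffixes in grouped_names.items():
--         if "_3.jpg" in suffixes and "_4.jpg" in suffixes: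
--             continue  # Ignore all if _3 and _4 exist
--         filtered_names.update({base_name + suffix for suffix in suffixes})  # Keep valid ones
--
--     return filtered_names
-- ===== SOURCE B (Python) =====
-- def filter_photo_names(photo_names):
--     """Same rule, different decomposition: find the bases having both a _3.jpg
--     and a _4.jpg suffix up front, then collect the names of every other base."""
--     has3 = {n[:-6] for n in photo_names if n[-6:] == "_3.jpg"}
--     has4 = {n[:-6] for n in photo_names if n[-6:] == "_4.jpg"}
--     bad_bases = has3 & has4
--     out = []
--     for base in dict.fromkeys(n[:-6] for n in photo_names):
--         if base not in bad_bases: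
--             out += [n for n in photo_names if n[:-6] == base]
--     return set(out)
-- ===== Notes on version B (the rewrite author's own statement) =====
-- stated objective: alternative
-- what changed: B computes the bad bases (those having both a _3.jpg and a _4.jpg suffix) with two direct suffix scans and a set intersection, then collects the surviving names base by base from the input itself - no dict of suffix sets and no rebuilding of names by concatenating base+suffix.
import Mathlib
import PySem

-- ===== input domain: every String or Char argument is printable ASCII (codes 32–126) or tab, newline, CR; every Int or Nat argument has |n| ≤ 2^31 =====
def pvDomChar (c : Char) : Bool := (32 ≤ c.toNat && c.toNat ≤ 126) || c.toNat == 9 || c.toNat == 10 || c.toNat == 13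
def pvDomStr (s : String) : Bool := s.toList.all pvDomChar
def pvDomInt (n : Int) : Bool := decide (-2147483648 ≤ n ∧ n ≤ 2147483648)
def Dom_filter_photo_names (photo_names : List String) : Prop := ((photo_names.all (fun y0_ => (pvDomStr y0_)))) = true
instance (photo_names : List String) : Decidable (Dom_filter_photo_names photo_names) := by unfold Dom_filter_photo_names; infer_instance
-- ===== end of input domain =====

-- B computes the bad bases (those with both a _3.jpg and a _4.jpg suffix) by two direct
-- suffix scans and a set intersection, then collects the surviving names base by base —
-- no dict of suffix sets and no rebuilding of names by concatenation (objective: alternative).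

-- name[:-6] (shared slicing helper; both Pythons write name[:-6])
def pvBase (n : String) : String := PySem.Str.slice n none (some (-6))
-- name[-6:]
def pvSuf (n : String) : String := PySem.Str.slice n (some (-6)) none

-- ===== PORT A =====
def filter_photo_names (photo_names : List String) : List String :=
  let grouped : PySem.Dict String (PySem.Set String) :=
    photo_names.foldl (fun grouped name =>
      -- if base_name not in grouped: grouped[base_name] = set()
      let grouped := grouped.setdefault (pvBase name) PySem.Set.empty
      -- grouped[base_name].add(name[-6:])   (in-place add = read, add, write back)
      grouped.insert (pvBase name)
        (PySem.Set.add (grouped.getD (pvBase name) PySem.Set.empty) (pvSuf name)))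
      PySem.Dict.empty
  let filtered : PySem.Set String :=
    grouped.items.foldl (fun filtered bs =>
      if PySem.Set.contains bs.2 "_3.jpg" && PySem.Set.contains bs.2 "_4.jpg" then filtered
      else PySem.Set.update filtered (bs.2.map (fun suffix => bs.1 ++ suffix)))
      PySem.Set.empty
  filtered

-- ===== PORT B =====
def filter_photo_names_alt (photo_names : List String) : List String :=
  let has3 : PySem.Set String :=
    PySem.Set.ofList ((photo_names.filter (fun n => pvSuf n == "_3.jpg")).map pvBase)
  let has4 : PySem.Set String :=
    PySem.Set.ofList ((photo_names.filter (fun n => pvSuf n == "_4.jpg")).map pvBase)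
  let bad_bases := PySem.Set.inter has3 has4
  let out : List String :=
    (PySem.List.dedup (photo_names.map pvBase)).foldl (fun out base =>
      if !(PySem.Set.contains bad_bases base) then
        out ++ photo_names.filter (fun n => pvBase n == base)
      else out) []
  PySem.Set.ofList out

-- ===== PRECONDITION & SPEC =====
def Spec_filter_photo_names (photo_names : List String) (out : List String) : Prop := out = filter_photo_names_alt photo_names
instance (photo_names : List String) (out : List String) : Decidable (Spec_filter_photo_names photo_names out) := by unfold Spec_filter_photo_names; infer_instance

-- ===== CLAIM (what is proved, stated in full; the proofs are below) =====
def Claim_equal_filter_photo_names : Prop := ∀ (photo_names : List String), Dom_filter_photo_names photo_names → Spec_filter_photo_names photo_names (filter_photo_names photo_names)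

-- ===== LEMMAS AND PROOFS =====

-- the set of suffixes A's dict holds for base b
def pvGrp (xs : List String) (b : String) : PySem.Set String :=
  PySem.Set.ofList ((xs.filter (fun n => pvBase n == b)).map pvSuf)

-- the common normal form both programs compute
def pvCanon (xs : List String) : List String :=
  (PySem.Set.ofList (xs.map pvBase)).flatMap (fun b =>
    if PySem.Set.contains (pvGrp xs b) "_3.jpg" && PySem.Set.contains (pvGrp xs b) "_4.jpg"
    then [] else PySem.Set.ofList (xs.filter (fun n => pvBase n == b)))

lemma pvBase_append_pvSuf (n : String) : pvBase n ++ pvSuf n = n := by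
  apply String.toList_inj.mp
  rw [String.toList_append]
  unfold pvBase pvSuf
  simp only [pysem]
  rw [PySem.List.slice_to_neg_ofNat n.toList 6 (by norm_num),
      PySem.List.slice_from_neg_ofNat n.toList 6 (by norm_num)]
  exact List.take_append_drop _ _

lemma pvAppend_inj (b : String) : Function.Injective (fun s => b ++ s) := by
  intro s t h
  simp only at h
  have h2 := congrArg String.toList h
  simp only [String.toList_append] at h2
  exact String.toList_inj.mp (List.append_cancel_left h2)

lemma pvBase_of_eq (n b : String) (h : pvBase n = b) : b ++ pvSuf n = n := by
  rw [← h]; exact pvBase_append_pvSuf n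

lemma pvOfList_map {k : String → String} (hk : Function.Injective k) (l : List String) :
    (PySem.Set.ofList l).map k = PySem.Set.ofList (l.map k) := by
  have hadd : ∀ (s : PySem.Set String) (x : String),
      (PySem.Set.add s x).map k = PySem.Set.add (s.map k) (k x) := by
    intro s x
    by_cases hx : x ∈ s
    · rw [PySem.Set.add_of_mem hx, PySem.Set.add_of_mem (List.mem_map_of_mem hx)]
    · rw [PySem.Set.add_of_not_mem hx, PySem.Set.add_of_not_mem (by
        intro hmem
        rcases List.mem_map.mp hmem with ⟨a, ha, hka⟩
        exact hx (hk hka ▸ ha)), List.map_append]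
      rfl
  induction l using List.reverseRecOn with
  | nil => rfl
  | append_singleton xs x ih =>
    rw [PySem.Set.ofList_append_singleton, hadd, ih, List.map_append,
        List.map_singleton, PySem.Set.ofList_append_singleton]

lemma pvOfList_append_disjoint (u v : List String) (h : ∀ y ∈ v, y ∉ u) :
    PySem.Set.ofList (u ++ v) = PySem.Set.ofList u ++ PySem.Set.ofList v := by
  rw [PySem.Set.ofList_append, PySem.Set.update_eq_append_filter]
  congr 1
  apply List.filter_eq_self.mpr
  intro y hy
  have hyv : y ∈ v := (PySem.Set.mem_ofList _ _).mp hy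
  have hyu : y ∉ PySem.Set.ofList u := by
    rw [PySem.Set.mem_ofList]; exact h y hyv
  simp [hyu]

lemma pvGrp_append (xs : List String) (n b : String) :
    pvGrp (xs ++ [n]) b =
      if pvBase n == b then PySem.Set.add (pvGrp xs b) (pvSuf n) else pvGrp xs b := by
  unfold pvGrp
  rw [List.filter_append]
  by_cases h : pvBase n == b
  · rw [if_pos h]
    have hf : List.filter (fun m => pvBase m == b) [n] = [n] := by simp [h]
    rw [hf, List.map_append, List.map_singleton, PySem.Set.ofList_append_singleton]
  · rw [if_neg h]
    have hf : List.filter (fun m => pvBase m == b) [n] = [] := by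
      simp [h]
    rw [hf, List.append_nil]

-- characterisation of A's grouping loop
lemma pvLoopA_items (xs : List String) :
    (xs.foldl (fun grouped name =>
      let grouped := grouped.setdefault (pvBase name) PySem.Set.empty
      grouped.insert (pvBase name)
        (PySem.Set.add (grouped.getD (pvBase name) PySem.Set.empty) (pvSuf name)))
      PySem.Dict.empty).items
    = (PySem.Set.ofList (xs.map pvBase)).map (fun b => (b, pvGrp xs b)) := by
  induction xs using List.reverseRecOn with
  | nil => rfl
  | append_singleton xs n ih =>
    rw [List.foldl_append]
    simp only [List.foldl_cons, List.foldl_nil]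
    have hkeys : (xs.foldl (fun grouped name =>
        let grouped := grouped.setdefault (pvBase name) PySem.Set.empty
        grouped.insert (pvBase name)
          (PySem.Set.add (grouped.getD (pvBase name) PySem.Set.empty) (pvSuf name)))
        PySem.Dict.empty).keys = PySem.Set.ofList (xs.map pvBase) := by
      simp only [PySem.Dict.keys]
      rw [ih, List.map_map]
      conv_rhs => rw [← List.map_id (PySem.Set.ofList (xs.map pvBase))]
      exact List.map_congr_left (fun b _ => rfl)
    rw [List.map_append, List.map_cons, List.map_nil, PySem.Set.ofList_append_singleton]
    by_cases hmem : pvBase n ∈ PySem.Set.ofList (xs.map pvBase)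
    · have hcont : (xs.foldl (fun grouped name =>
          let grouped := grouped.setdefault (pvBase name) PySem.Set.empty
          grouped.insert (pvBase name)
            (PySem.Set.add (grouped.getD (pvBase name) PySem.Set.empty) (pvSuf name)))
          PySem.Dict.empty).contains (pvBase n) = true := by
        rw [PySem.Dict.contains_iff_mem_keys, hkeys]; exact hmem
      have hnd : (xs.foldl (fun grouped name =>
          let grouped := grouped.setdefault (pvBase name) PySem.Set.empty
          grouped.insert (pvBase name)
            (PySem.Set.add (grouped.getD (pvBase name) PySem.Set.empty) (pvSuf name)))
          PySem.Dict.empty).keys.Nodup := by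
        rw [hkeys]; exact PySem.Set.nodup_ofList _
      have hmemit : (pvBase n, pvGrp xs (pvBase n)) ∈ (xs.foldl (fun grouped name =>
          let grouped := grouped.setdefault (pvBase name) PySem.Set.empty
          grouped.insert (pvBase name)
            (PySem.Set.add (grouped.getD (pvBase name) PySem.Set.empty) (pvSuf name)))
          PySem.Dict.empty).items := by
        rw [ih]
        exact List.mem_map_of_mem hmem
      rw [PySem.Dict.setdefault_of_contains _ _ hcont,
          PySem.Dict.getD_of_mem_items _ hmemit hnd,
          PySem.Dict.items_insert_of_contains _ _ hcont,
          ih, List.map_map, PySem.Set.add_of_mem hmem]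
      apply List.map_congr_left
      intro b hb
      simp only [Function.comp_apply]
      rw [pvGrp_append]
      by_cases hbn : b = pvBase n
      · subst hbn
        simp
      · have h1 : (b == pvBase n) = false := by simp [hbn]
        have h2 : (pvBase n == b) = false := by simp [Ne.symm hbn]
        simp [h1, h2]
    · have hcont : (xs.foldl (fun grouped name =>
          let grouped := grouped.setdefault (pvBase name) PySem.Set.empty
          grouped.insert (pvBase name)
            (PySem.Set.add (grouped.getD (pvBase name) PySem.Set.empty) (pvSuf name)))
          PySem.Dict.empty).contains (pvBase n) = false := by
        rw [Bool.eq_false_iff]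
        intro h
        exact hmem (hkeys ▸ (PySem.Dict.contains_iff_mem_keys _ _).mp h)
      rw [PySem.Dict.setdefault_of_not_contains _ _ hcont,
          PySem.Dict.getD_insert_self, PySem.Dict.insert_insert_self,
          PySem.Dict.items_insert_of_not_contains _ _ hcont,
          ih, PySem.Set.add_of_not_mem hmem, List.map_append]
      congr 1
      · apply List.map_congr_left
        intro b hb
        rw [pvGrp_append]
        have h2 : (pvBase n == b) = false := by
          simp only [beq_eq_false_iff_ne, ne_eq]
          intro h; exact hmem (h ▸ hb)
        simp [h2]
      · have hg : pvGrp (xs ++ [n]) (pvBase n) = PySem.Set.add (pvGrp xs (pvBase n)) (pvSuf n) := by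
          rw [pvGrp_append]; simp
        have hempty : pvGrp xs (pvBase n) = PySem.Set.empty := by
          unfold pvGrp
          have hf : xs.filter (fun m => pvBase m == pvBase n) = [] := by
            apply List.filter_eq_nil_iff.mpr
            intro m hm
            simp only [beq_eq_false_iff_ne, ne_eq, Bool.not_eq_true]
            intro h
            exact hmem ((PySem.Set.mem_ofList _ _).mpr (h ▸ List.mem_map_of_mem hm))
          rw [hf]; rfl
        rw [List.map_cons, List.map_nil, hg, hempty]

-- A's second loop: updating a set with pairwise-disjoint nodup blocks concatenates them
lemma pvFoldl_update_flat {α : Type} (l : List α) (p : α → Bool) (h : α → List String)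
    (acc : PySem.Set String)
    (hnd : ∀ a ∈ l, (h a).Nodup)
    (hacc : ∀ a ∈ l, ∀ x ∈ h a, x ∉ acc)
    (hpw : l.Pairwise (fun a a' => ∀ x ∈ h a', x ∉ h a)) :
    l.foldl (fun acc a => if p a then acc else PySem.Set.update acc (h a)) acc
      = acc ++ l.flatMap (fun a => if p a then [] else h a) := by
  induction l generalizing acc with
  | nil => simp
  | cons a l ih =>
    simp only [List.foldl_cons, List.flatMap_cons]
    rcases List.pairwise_cons.mp hpw with ⟨hhead, htail⟩
    by_cases hp : p a = true
    · rw [if_pos hp, if_pos hp, List.nil_append]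
      exact ih acc (fun a' ha' => hnd a' (List.mem_cons_of_mem _ ha'))
        (fun a' ha' x hx => hacc a' (List.mem_cons_of_mem _ ha') x hx) htail
    · rw [if_neg hp, if_neg hp]
      rw [PySem.Set.update_eq_append_of_disjoint _ _ (hnd a (List.mem_cons_self ..))
        (fun x hx => hacc a (List.mem_cons_self ..) x hx)]
      have hacc' : ∀ a' ∈ l, ∀ x ∈ h a', x ∉ acc ++ h a := by
        intro a' ha' x hx hmem
        rcases List.mem_append.mp hmem with hm | hm
        · exact hacc a' (List.mem_cons_of_mem _ ha') x hx hm
        · exact hhead a' ha' x hx hm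
      rw [ih (acc ++ h a) (fun a' ha' => hnd a' (List.mem_cons_of_mem _ ha')) hacc' htail,
          List.append_assoc]

lemma pvMem_block (xs : List String) (b x : String)
    (hx : x ∈ (pvGrp xs b).map (fun s => b ++ s)) : pvBase x = b ∧ x ∈ xs := by
  rcases List.mem_map.mp hx with ⟨s, hs, rfl⟩
  rcases List.mem_map.mp ((PySem.Set.mem_ofList _ _).mp hs) with ⟨m, hm, rfl⟩
  have hmf := List.mem_filter.mp hm
  have hb : pvBase m = b := by simpa using hmf.2
  have heq : b ++ pvSuf m = m := pvBase_of_eq _ _ hb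
  rw [heq]
  exact ⟨hb, hmf.1⟩

lemma pvBlock_eq (xs : List String) (b : String) :
    (pvGrp xs b).map (fun s => b ++ s)
      = PySem.Set.ofList (xs.filter (fun n => pvBase n == b)) := by
  unfold pvGrp
  rw [pvOfList_map (pvAppend_inj b), List.map_map]
  congr 1
  conv_rhs => rw [← List.map_id (List.filter (fun n => pvBase n == b) xs)]
  apply List.map_congr_left
  intro m hm
  have hb : pvBase m = b := by simpa using (List.mem_filter.mp hm).2
  simpa using pvBase_of_eq _ _ hb

lemma pvBad_eq (xs : List String) (b : String) :
    PySem.Set.contains (PySem.Set.inter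
        (PySem.Set.ofList ((xs.filter (fun n => pvSuf n == "_3.jpg")).map pvBase))
        (PySem.Set.ofList ((xs.filter (fun n => pvSuf n == "_4.jpg")).map pvBase))) b
    = (PySem.Set.contains (pvGrp xs b) "_3.jpg" && PySem.Set.contains (pvGrp xs b) "_4.jpg") := by
  unfold pvGrp
  apply Bool.eq_iff_iff.mpr
  rw [Bool.and_eq_true, PySem.Set.contains_iff, PySem.Set.contains_iff, PySem.Set.contains_iff,
      PySem.Set.mem_inter, PySem.Set.mem_ofList, PySem.Set.mem_ofList,
      PySem.Set.mem_ofList, PySem.Set.mem_ofList]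
  simp only [List.mem_map, List.mem_filter, beq_iff_eq]
  constructor
  · rintro ⟨⟨n3, ⟨hn3, hs3⟩, hb3⟩, ⟨n4, ⟨hn4, hs4⟩, hb4⟩⟩
    exact ⟨⟨n3, ⟨hn3, hb3⟩, hs3⟩, ⟨n4, ⟨hn4, hb4⟩, hs4⟩⟩
  · rintro ⟨⟨n3, ⟨hn3, hb3⟩, hs3⟩, ⟨n4, ⟨hn4, hb4⟩, hs4⟩⟩
    exact ⟨⟨n3, ⟨hn3, hs3⟩, hb3⟩, ⟨n4, ⟨hn4, hs4⟩, hb4⟩⟩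

lemma pvA_char (xs : List String) : filter_photo_names xs = pvCanon xs := by
  simp only [filter_photo_names]
  rw [pvLoopA_items, List.foldl_map]
  have hnd : ∀ b ∈ PySem.Set.ofList (xs.map pvBase),
      ((pvGrp xs b).map (fun s => b ++ s)).Nodup :=
    fun b _ => (PySem.Set.nodup_ofList _).map (pvAppend_inj b)
  have hacc : ∀ b ∈ PySem.Set.ofList (xs.map pvBase),
      ∀ x ∈ (pvGrp xs b).map (fun s => b ++ s), x ∉ (PySem.Set.empty : PySem.Set String) := by
    intro b _ x _ hx
    simp [PySem.Set.empty] at hx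
  have hpw : (PySem.Set.ofList (xs.map pvBase)).Pairwise
      (fun b b' => ∀ x ∈ (pvGrp xs b').map (fun s => b' ++ s),
        x ∉ (pvGrp xs b).map (fun s => b ++ s)) := by
    apply List.Pairwise.imp ?_ (PySem.Set.nodup_ofList (xs.map pvBase))
    intro b b' hne x hx' hx
    exact hne ((pvMem_block xs b x hx).1 ▸ (pvMem_block xs b' x hx').1 ▸ rfl)
  have hmain := pvFoldl_update_flat (PySem.Set.ofList (xs.map pvBase))
    (fun b => PySem.Set.contains (pvGrp xs b) "_3.jpg" && PySem.Set.contains (pvGrp xs b) "_4.jpg")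
    (fun b => (pvGrp xs b).map (fun s => b ++ s))
    PySem.Set.empty hnd hacc hpw
  simp only at hmain ⊢
  rw [hmain]
  unfold pvCanon
  rw [show (PySem.Set.empty : PySem.Set String) ++ _ = _ from List.nil_append _]
  congr 1
  funext b
  rw [pvBlock_eq]

lemma pvFoldl_if_append {α : Type} (l : List α) (p : α → Bool) (h : α → List String)
    (acc : List String) :
    l.foldl (fun acc a => if p a then acc ++ h a else acc) acc
      = acc ++ l.flatMap (fun a => if p a then h a else []) := by
  induction l generalizing acc with
  | nil => simp
  | cons a l ih =>
    simp only [List.foldl_cons, List.flatMap_cons]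
    by_cases hp : p a = true
    · rw [if_pos hp, if_pos hp, ih, List.append_assoc]
    · rw [if_neg hp, if_neg hp, ih, List.nil_append]

lemma pvOfList_flatMap (bs : List String) (h : String → List String)
    (hb : ∀ b ∈ bs, ∀ x ∈ h b, pvBase x = b) (hnd : bs.Nodup) :
    PySem.Set.ofList (bs.flatMap h) = bs.flatMap (fun b => PySem.Set.ofList (h b)) := by
  induction bs with
  | nil => rfl
  | cons b l ih =>
    rw [List.flatMap_cons, List.flatMap_cons]
    rw [pvOfList_append_disjoint _ _ (by
      intro y hy hyb
      rcases List.mem_flatMap.mp hy with ⟨b', hb', hyb'⟩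
      have h1 : pvBase y = b' := hb b' (List.mem_cons_of_mem _ hb') y hyb'
      have h2 : pvBase y = b := hb b (List.mem_cons_self ..) y hyb
      exact (List.nodup_cons.mp hnd).1 ((h1 ▸ h2) ▸ hb'))]
    rw [ih (fun b' hb' x hx => hb b' (List.mem_cons_of_mem _ hb') x hx)
      (List.nodup_cons.mp hnd).2]

lemma pvB_char (xs : List String) : filter_photo_names_alt xs = pvCanon xs := by
  simp only [filter_photo_names_alt, PySem.List.dedup_eq_ofList]
  rw [pvFoldl_if_append, List.nil_append]
  rw [pvOfList_flatMap _ _ (by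
      intro b _ x hx
      by_cases hc : (!(PySem.Set.contains (PySem.Set.inter
          (PySem.Set.ofList ((xs.filter (fun n => pvSuf n == "_3.jpg")).map pvBase))
          (PySem.Set.ofList ((xs.filter (fun n => pvSuf n == "_4.jpg")).map pvBase))) b)) = true
      · rw [if_pos hc] at hx
        simpa using (List.mem_filter.mp hx).2
      · rw [if_neg hc] at hx
        exact absurd hx (List.not_mem_nil)) (PySem.Set.nodup_ofList _)]
  unfold pvCanon
  congr 1
  funext b
  rw [pvBad_eq xs b]
  split_ifs with h1 h2 <;> first | rfl | simp_all

-- ===== VERDICT (by name: the statement is the Claim_ definition above) =====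
theorem filter_photo_names_spec : Claim_equal_filter_photo_names := by
  intro xs _
  unfold Spec_filter_photo_names
  rw [pvA_char, pvB_char]
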